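-- pv_equiv track=rewrite | github.com/Nikhil-Paleti/algorithms | wild/count_paths_by_types_topdown.py | count_valid_paths_topdown
-- ===== SOURCE A (Python) =====
-- from functools import lru_cache
-- from typing import List, Tuple
--
-- def count_valid_paths_topdown(shop_types: List[str], roads: List[Tuple[int, int]]) -> int:
--     """
--     Count all valid paths that visit exactly one shop of each distinct type.
--
--     Args:
--         shop_types: list of shop type strings of length n.
--         roads: list of undirected edges (u, v).
--
--     Returns:
--         Total number of valid paths.
--     """
--     n = len(shop_types)
--     if n == 0:
--         return 0
--
--     # Build graph (adjacency list)
--     graph = [[] for _ in range(n)]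
--     for u, v in roads:
--         if u == v:
--             # ignore self-loops; they can't help build length-T paths with distinct nodes
--             continue
--         graph[u].append(v)
--         graph[v].append(u)
--
--     # Map each distinct type to a bit position
--     # (preserve order of first appearance for determinism)
--     distinct_types = list(dict.fromkeys(shop_types))
--     T = len(distinct_types)
--     tbit = {t: i for i, t in enumerate(distinct_types)}
--     full_mask = (1 << T) - 1
--
--     # Precompute type bit for each node
--     node_tbit = [tbit[tp] for tp in shop_types]
--
--     @lru_cache(maxsize=None)
--     def dfs(node: int, mask: int) -> int:
--         """
--         Number of paths ending at `node` having already used the set of types in `mask`.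
--         """
--         if mask == full_mask:
--             # All types used exactly once
--             return 1
--
--         total = 0
--         for nei in graph[node]:
--             tb = node_tbit[nei]
--             if (mask >> tb) & 1:
--                 # This neighbor's type already used — can't include another shop of same type
--                 continue
--             total += dfs(nei, mask | (1 << tb))
--         return total
--
--     # Start from every node as a length-1 path using its own type.
--     ans = 0
--     for u in range(n):
--         start_mask = 1 << node_tbit[u]
--         ans += dfs(u, start_mask)
--
--     return ans
-- ===== SOURCE B (Python) =====
-- def count_valid_paths_topdown(shop_types, roads):
--     n = len(shop_types)
--     if n == 0:
--         return 0
--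
--     graph = [[] for _ in range(n)]
--     for u, v in roads:
--         if u == v:
--             continue
--         graph[u].append(v)
--         graph[v].append(u)
--
--     distinct_types = list(dict.fromkeys(shop_types))
--     T = len(distinct_types)
--     tbit = {t: i for i, t in enumerate(distinct_types)}
--     node_tbit = [tbit[tp] for tp in shop_types]
--
--     # Layered frontier DP: frontier maps (node, mask) -> number of partial
--     # paths ending at node whose set of used type bits is mask.
--     frontier = {}
--     for u in range(n):
--         key = (u, 1 << node_tbit[u])
--         frontier[key] = frontier.get(key, 0) + 1
--
--     # After k extension rounds every mask has k+1 bits; T-1 rounds reach full.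
--     for _ in range(T - 1):
--         nxt = {}
--         for (node, mask), c in frontier.items():
--             for nei in graph[node]:
--                 tb = node_tbit[nei]
--                 if not (mask >> tb) & 1:
--                     key = (nei, mask | (1 << tb))
--                     nxt[key] = nxt.get(key, 0) + c
--         frontier = nxt
--
--     return sum(frontier.values())
-- ===== Notes on version B (the rewrite author's own statement) =====
-- stated objective: alternative
-- what changed: Replaces the lru_cache top-down dfs recursion over (node, mask) states by an iterative layered frontier DP: a dict mapping (node, type-mask) to the number of partial paths ending there, initialised with every single node and extended T-1 rounds along the graph, returning the sum of the final layer's counts.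
import Mathlib
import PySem

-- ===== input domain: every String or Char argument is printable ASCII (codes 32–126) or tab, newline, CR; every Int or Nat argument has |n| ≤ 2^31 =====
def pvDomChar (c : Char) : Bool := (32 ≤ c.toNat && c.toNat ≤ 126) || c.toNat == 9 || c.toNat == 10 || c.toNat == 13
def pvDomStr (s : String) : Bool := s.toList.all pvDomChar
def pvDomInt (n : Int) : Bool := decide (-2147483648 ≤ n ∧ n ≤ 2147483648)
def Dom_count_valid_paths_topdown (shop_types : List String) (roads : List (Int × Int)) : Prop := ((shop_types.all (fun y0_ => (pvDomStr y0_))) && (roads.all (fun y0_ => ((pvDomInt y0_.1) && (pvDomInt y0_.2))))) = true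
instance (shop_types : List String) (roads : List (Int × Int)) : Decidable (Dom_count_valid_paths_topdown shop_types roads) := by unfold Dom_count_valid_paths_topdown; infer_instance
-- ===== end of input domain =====

-- B replaces A's memoized top-down recursion by an iterative layered frontier DP
-- (a dict of (node, type-mask) partial-path counts, extended T-1 rounds); same return value (alternative decomposition).

-- ===== PORT A =====
-- shared setup helpers (the graph build / distinct-type / node_tbit lines are identical in both Pythons)

-- Python list index with negative wraparound (exact for -n ≤ i < n on a list of length n; Pre_ excludes the rest)
def pvNorm (n : Nat) (i : Int) : Nat := if i < 0 then (i + n).toNat else i.toNat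

def pvAt {α : Type} (xs : List α) (n : Nat) (i : Int) (d : α) : α := xs.getD (pvNorm n i) d

def pvAddEdge (n : Nat) (g : List (List Int)) (e : Int × Int) : List (List Int) :=
  if e.1 = e.2 then g
  else
    let g1 := g.set (pvNorm n e.1) (pvAt g n e.1 [] ++ [e.2])
    g1.set (pvNorm n e.2) (pvAt g1 n e.2 [] ++ [e.1])

def pvGraph (n : Nat) (roads : List (Int × Int)) : List (List Int) :=
  roads.foldl (pvAddEdge n) (List.replicate n [])

-- node_tbit: each shop type mapped to its index among the distinct types (first-appearance order)
def pvNodeTbit (shop_types : List String) : List Nat :=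
  shop_types.map (fun tp => (PySem.List.index? (PySem.List.dedup shop_types) tp).getD 0)

-- A's dfs; the fuel argument only makes the recursion structural ((2^T-1)+1 is always enough,
-- since every recursive call adds one of the T type bits to mask)
def pvDfs (g : List (List Int)) (ntb : List Nat) (n full : Nat) : Nat → Int → Nat → Int
  | 0, _, _ => 0
  | fuel+1, node, mask =>
    if mask = full then 1
    else
      (pvAt g n node []).foldl (fun acc nei =>
        let tb := pvAt ntb n nei 0
        if (mask >>> tb) &&& 1 = 1 then acc
        else acc + pvDfs g ntb n full fuel nei (mask ||| (1 <<< tb))) 0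

def count_valid_paths_topdown (shop_types : List String) (roads : List (Int × Int)) : Int :=
  let n := shop_types.length
  if n = 0 then 0
  else
    let g := pvGraph n roads
    let T := (PySem.List.dedup shop_types).length
    let ntb := pvNodeTbit shop_types
    let full := 2 ^ T - 1
    (PySem.List.pyRange 0 n 1).foldl
      (fun acc u => acc + pvDfs g ntb n full (full + 1) u (1 <<< pvAt ntb n u 0)) 0

-- ===== PORT B =====
def pvFrontKey (ntb : List Nat) (n : Nat) (u : Int) : Int × Nat := (u, 1 <<< pvAt ntb n u 0)

-- one frontier entry ((node, mask), c) pushed to all admissible neighbours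
def pvStepEntry (g : List (List Int)) (ntb : List Nat) (n : Nat)
    (nxt : PySem.Dict (Int × Nat) Int) (p : (Int × Nat) × Int) : PySem.Dict (Int × Nat) Int :=
  (pvAt g n p.1.1 []).foldl (fun d nei =>
    let tb := pvAt ntb n nei 0
    if (p.1.2 >>> tb) &&& 1 = 1 then d
    else
      d.insert (nei, p.1.2 ||| (1 <<< tb)) (d.getD (nei, p.1.2 ||| (1 <<< tb)) 0 + p.2)) nxt

def pvStep (g : List (List Int)) (ntb : List Nat) (n : Nat)
    (fr : PySem.Dict (Int × Nat) Int) : PySem.Dict (Int × Nat) Int :=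
  fr.items.foldl (pvStepEntry g ntb n) PySem.Dict.empty

def count_valid_paths_topdown_alt (shop_types : List String) (roads : List (Int × Int)) : Int :=
  let n := shop_types.length
  if n = 0 then 0
  else
    let g := pvGraph n roads
    let T := (PySem.List.dedup shop_types).length
    let ntb := pvNodeTbit shop_types
    let fr0 := (PySem.List.pyRange 0 n 1).foldl
      (fun d u => d.insert (pvFrontKey ntb n u) (d.getD (pvFrontKey ntb n u) 0 + 1))
      PySem.Dict.empty
    let frT := (PySem.List.pyRange 0 ((T : Int) - 1) 1).foldl (fun fr _ => pvStep g ntb n fr) fr0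
    frT.values.foldl (· + ·) 0

-- ===== PRECONDITION & SPEC =====
-- Pre_ excludes exactly the inputs where A raises IndexError: a non-self-loop road endpoint
-- outside [-n, n) while the shop list is non-empty (with an empty shop list A returns 0 before indexing).
def Pre_count_valid_paths_topdown (shop_types : List String) (roads : List (Int × Int)) : Prop :=
  shop_types = [] ∨ ∀ e ∈ roads, e.1 ≠ e.2 →
    -(shop_types.length : Int) ≤ e.1 ∧ e.1 < (shop_types.length : Int) ∧
    -(shop_types.length : Int) ≤ e.2 ∧ e.2 < (shop_types.length : Int)
instance (shop_types : List String) (roads : List (Int × Int)) : Decidable (Pre_count_valid_paths_topdown shop_types roads) := by unfold Pre_count_valid_paths_topdown; infer_instance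

def pvWitness_count_valid_paths_topdown : List String × (List (Int × Int)) := (["a", "b"], [(0, 1)])

def Spec_count_valid_paths_topdown (shop_types : List String) (roads : List (Int × Int)) (out : Int) : Prop := out = count_valid_paths_topdown_alt shop_types roads
instance (shop_types : List String) (roads : List (Int × Int)) (out : Int) : Decidable (Spec_count_valid_paths_topdown shop_types roads out) := by unfold Spec_count_valid_paths_topdown; infer_instance

-- ===== CLAIM (what is proved, stated in full; the proofs are below) =====
def Claim_equal_count_valid_paths_topdown : Prop := ∀ (shop_types : List String) (roads : List (Int × Int)), Dom_count_valid_paths_topdown shop_types roads → Pre_count_valid_paths_topdown shop_types roads → Spec_count_valid_paths_topdown shop_types roads (count_valid_paths_topdown shop_types roads)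

-- ===== LEMMAS AND PROOFS =====

-- the dfs value with ample fuel, as a function of a frontier key
def pvD (g : List (List Int)) (ntb : List Nat) (n full : Nat) (p : Int × Nat) : Int :=
  pvDfs g ntb n full (full + 1) p.1 p.2

-- weighted sum of a function over a frontier dict
def pvSum (d : PySem.Dict (Int × Nat) Int) (f : Int × Nat → Int) : Int :=
  (d.items.map (fun p => p.2 * f p.1)).sum

-- number of type bits (below T) set in a mask
def pvPc (T mask : Nat) : Nat := (List.range T).countP (fun i => mask.testBit i)

-- masks reachable after j-1 extension rounds: j bits, all below T
def pvOk (T j mask : Nat) : Prop := mask &&& (2 ^ T - 1) = mask ∧ pvPc T mask = j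

theorem pvAt_mem {α : Type} (xs : List α) (n : Nat) (i : Int) (d : α) :
    pvAt xs n i d = d ∨ pvAt xs n i d ∈ xs := by
  unfold pvAt
  rcases h : xs[pvNorm n i]? with _ | a
  · left; simp [List.getD, h]
  · right; simp [List.getD, h]; exact List.mem_of_getElem? h

theorem pvBit (mask tb : Nat) : ((mask >>> tb) &&& 1 = 1) ↔ mask.testBit tb := by
  simp [Nat.testBit, Nat.and_one_is_mod, Nat.one_and_eq_mod_two]

theorem pvMaskGrow (T mask tb : Nat) (hT : tb < T) (hbit : mask.testBit tb = false) :
    mask &&& (2 ^ T - 1) < (mask ||| 2 ^ tb) &&& (2 ^ T - 1) ∧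
    (mask ||| 2 ^ tb) &&& (2 ^ T - 1) ≤ 2 ^ T - 1 := by
  refine ⟨Nat.lt_of_testBit tb ?_ ?_ ?_, Nat.and_le_right⟩
  · simp [hbit]
  · simp [hT]
  · intro j hj
    have : tb ≠ j := by omega
    simp [this]

theorem pvTb_lt (ntb : List Nat) (n T : Nat) (hT : 0 < T) (hntb : ∀ x ∈ ntb, x < T)
    (i : Int) : pvAt ntb n i 0 < T := by
  rcases pvAt_mem ntb n i 0 with h | h
  · omega
  · exact hntb _ h

theorem pvDfs_fuel (g : List (List Int)) (ntb : List Nat) (n T : Nat)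
    (hT : 0 < T) (hntb : ∀ x ∈ ntb, x < T) :
    ∀ f1 f2 node mask, (2 ^ T - 1) - (mask &&& (2 ^ T - 1)) < f1 →
      (2 ^ T - 1) - (mask &&& (2 ^ T - 1)) < f2 →
      pvDfs g ntb n (2 ^ T - 1) f1 node mask = pvDfs g ntb n (2 ^ T - 1) f2 node mask := by
  intro f1
  induction f1 with
  | zero => intro f2 node mask h1 h2; omega
  | succ a ih =>
    intro f2 node mask h1 h2
    match f2, h2 with
    | b+1, h2 =>
      simp only [pvDfs]
      by_cases hm : mask = 2 ^ T - 1
      · simp [hm]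
      · simp only [if_neg hm]
        apply List.foldl_ext
        intro acc nei _
        by_cases hb : (mask >>> pvAt ntb n nei 0) &&& 1 = 1
        · simp [hb]
        · simp only [if_neg hb]
          congr 1
          have htb : pvAt ntb n nei 0 < T := pvTb_lt ntb n T hT hntb nei
          have hbit : mask.testBit (pvAt ntb n nei 0) = false := by
            rcases h : mask.testBit (pvAt ntb n nei 0)
            · rfl
            · exact absurd ((pvBit _ _).mpr h) hb
          have hg := pvMaskGrow T mask (pvAt ntb n nei 0) htb hbit
          rw [Nat.one_shiftLeft]
          apply ih
          · omega
          · omega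

theorem pvSum_replace (f : Int × Nat → Int) (k : Int × Nat) (w c : Int) :
    ∀ (l : List ((Int × Nat) × Int)), (l.map (·.1)).Nodup → (k, w) ∈ l →
    ((l.map (fun p => if p.1 == k then (k, w + c) else p)).map (fun p => p.2 * f p.1)).sum
      = (l.map (fun p => p.2 * f p.1)).sum + c * f k := by
  intro l
  induction l with
  | nil => intro _ h; simp at h
  | cons p t ih =>
    intro hnd hmem
    rw [List.map_cons] at hnd
    rcases List.nodup_cons.mp hnd with ⟨hnotin, hnd'⟩
    by_cases hp : p.1 = k
    · have hpt : p = (k, w) := by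
        rcases List.mem_cons.mp hmem with h | h
        · exact h.symm
        · exact absurd (hp ▸ List.mem_map.mpr ⟨(k, w), h, rfl⟩) hnotin
      subst hpt
      have htid : t.map (fun p => if p.1 == k then (k, w + c) else p) = t := by
        rw [show t = t.map id by simp]
        simp only [List.map_map]
        apply List.map_congr_left
        intro x hx
        have hx1 : x.1 ≠ k := by
          intro hk
          exact absurd (List.mem_map.mpr ⟨x, hx, hk⟩) (by simpa using hnotin)
        simp [hx1]
      simp only [List.map_cons, htid, BEq.rfl, if_true, List.sum_cons]
      ring
    · have hpk : (p.1 == k) = false := by simp [hp]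
      have hmem' : (k, w) ∈ t := by
        rcases List.mem_cons.mp hmem with h | h
        · exact absurd (congrArg Prod.fst h.symm) hp
        · exact h
      simp only [List.map_cons, hpk, Bool.false_eq_true, if_false, List.sum_cons,
        ih hnd' hmem']
      ring

theorem pvSum_insert (d : PySem.Dict (Int × Nat) Int) (f : Int × Nat → Int)
    (k : Int × Nat) (c : Int) (hnd : d.keys.Nodup) :
    pvSum (d.insert k (d.getD k 0 + c)) f = pvSum d f + c * f k := by
  unfold pvSum
  by_cases hc : d.contains k
  · rw [PySem.Dict.items_insert_of_contains d _ hc]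
    have hkmem : k ∈ d.keys := (PySem.Dict.contains_iff_mem_keys d k).mp hc
    have : ∃ w, (k, w) ∈ d.items := by
      rcases List.mem_map.mp hkmem with ⟨p, hp, hpk⟩
      exact ⟨p.2, by rwa [← hpk, Prod.mk.eta]⟩
    rcases this with ⟨w, hw⟩
    have hgd : d.getD k 0 = w := PySem.Dict.getD_of_mem_items d hw hnd 0
    rw [hgd]
    exact pvSum_replace f k w c d.items hnd hw
  · rw [PySem.Dict.items_insert_of_not_contains d _ (by simpa using hc),
      PySem.Dict.getD_of_not_contains d 0 (by simpa using hc)]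
    simp

-- generic foldl preservation / key-membership propagation
theorem pvFoldl_pres {β σ : Type} (step : σ → β → σ) (P : σ → Prop)
    (h : ∀ d x, P d → P (step d x)) : ∀ (l : List β) (d : σ), P d → P (l.foldl step d) := by
  intro l
  induction l with
  | nil => intro d hd; exact hd
  | cons x t ih => intro d hd; exact ih _ (h d x hd)

theorem pvFoldl_keys {β : Type} (step : PySem.Dict (Int × Nat) Int → β → PySem.Dict (Int × Nat) Int)
    (P : β → (Int × Nat) → Prop)
    (h : ∀ d x k, k ∈ (step d x).keys → k ∈ d.keys ∨ P x k) :
    ∀ (l : List β) (d) (k), k ∈ (l.foldl step d).keys → k ∈ d.keys ∨ ∃ x ∈ l, P x k := by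
  intro l
  induction l with
  | nil => intro d k hk; exact Or.inl hk
  | cons x t ih =>
    intro d k hk
    rcases ih _ k hk with hm | ⟨y, hy, hp⟩
    · rcases h d x k hm with hm' | hp
      · exact Or.inl hm'
      · exact Or.inr ⟨x, List.mem_cons_self .., hp⟩
    · exact Or.inr ⟨y, List.mem_cons_of_mem _ hy, hp⟩

-- inner loop: push one entry ((node, mask), c) along its neighbour list
theorem pvInner_sum (g : List (List Int)) (ntb : List Nat) (n : Nat)
    (node : Int) (mask : Nat) (c : Int) (f : Int × Nat → Int) :
    ∀ (lst : List Int) (d : PySem.Dict (Int × Nat) Int), d.keys.Nodup →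
      pvSum (lst.foldl (fun d nei =>
        let tb := pvAt ntb n nei 0
        if (mask >>> tb) &&& 1 = 1 then d
        else d.insert (nei, mask ||| (1 <<< tb)) (d.getD (nei, mask ||| (1 <<< tb)) 0 + c)) d) f
      = pvSum d f + (lst.map (fun nei =>
          let tb := pvAt ntb n nei 0
          if (mask >>> tb) &&& 1 = 1 then (0 : Int)
          else c * f (nei, mask ||| (1 <<< tb)))).sum := by
  intro lst
  induction lst with
  | nil => intro d hnd; simp
  | cons nei t ih =>
    intro d hnd
    simp only [List.foldl_cons, List.map_cons, List.sum_cons]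
    by_cases hb : (mask >>> pvAt ntb n nei 0) &&& 1 = 1
    · simp only [if_pos hb]
      rw [ih d hnd]; ring
    · simp only [if_neg hb]
      rw [ih _ (PySem.Dict.nodup_keys_insert _ _ _ hnd), pvSum_insert d f _ c hnd]
      ring

-- entry contribution
def pvE (g : List (List Int)) (ntb : List Nat) (n : Nat) (f : Int × Nat → Int)
    (p : (Int × Nat) × Int) : Int :=
  ((pvAt g n p.1.1 []).map (fun nei =>
    let tb := pvAt ntb n nei 0
    if (p.1.2 >>> tb) &&& 1 = 1 then (0 : Int)
    else p.2 * f (nei, p.1.2 ||| (1 <<< tb)))).sum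

theorem pvStepEntry_sum (g : List (List Int)) (ntb : List Nat) (n : Nat) (f : Int × Nat → Int)
    (d : PySem.Dict (Int × Nat) Int) (p : (Int × Nat) × Int) (hnd : d.keys.Nodup) :
    pvSum (pvStepEntry g ntb n d p) f = pvSum d f + pvE g ntb n f p := by
  exact pvInner_sum g ntb n p.1.1 p.1.2 p.2 f (pvAt g n p.1.1 []) d hnd

theorem pvStepEntry_nodup (g : List (List Int)) (ntb : List Nat) (n : Nat)
    (d : PySem.Dict (Int × Nat) Int) (p : (Int × Nat) × Int) (hnd : d.keys.Nodup) :
    (pvStepEntry g ntb n d p).keys.Nodup := by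
  unfold pvStepEntry
  refine pvFoldl_pres _ (fun (d : PySem.Dict (Int × Nat) Int) => d.keys.Nodup) ?_ _ _ hnd
  intro d' nei hd'
  dsimp only
  split
  · exact hd'
  · exact PySem.Dict.nodup_keys_insert _ _ _ hd'

theorem pvOuter_sum (g : List (List Int)) (ntb : List Nat) (n : Nat) (f : Int × Nat → Int) :
    ∀ (l : List ((Int × Nat) × Int)) (d : PySem.Dict (Int × Nat) Int), d.keys.Nodup →
      pvSum (l.foldl (pvStepEntry g ntb n) d) f = pvSum d f + (l.map (pvE g ntb n f)).sum := by
  intro l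
  induction l with
  | nil => intro d hnd; simp
  | cons p t ih =>
    intro d hnd
    simp only [List.foldl_cons, List.map_cons, List.sum_cons]
    rw [ih _ (pvStepEntry_nodup g ntb n d p hnd), pvStepEntry_sum g ntb n f d p hnd]
    ring

-- keys generated by one entry
theorem pvStepEntry_keys (g : List (List Int)) (ntb : List Nat) (n : Nat)
    (d : PySem.Dict (Int × Nat) Int) (p : (Int × Nat) × Int) (k : Int × Nat)
    (hk : k ∈ (pvStepEntry g ntb n d p).keys) :
    k ∈ d.keys ∨ ∃ tb, tb = pvAt ntb n k.1 0 ∧ ¬((p.1.2 >>> tb) &&& 1 = 1) ∧ k.2 = p.1.2 ||| (1 <<< tb) := by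
  unfold pvStepEntry at hk
  have := pvFoldl_keys (fun d nei =>
      let tb := pvAt ntb n nei 0
      if (p.1.2 >>> tb) &&& 1 = 1 then d
      else d.insert (nei, p.1.2 ||| (1 <<< tb)) (d.getD (nei, p.1.2 ||| (1 <<< tb)) 0 + p.2))
    (fun nei k => ¬((p.1.2 >>> pvAt ntb n nei 0) &&& 1 = 1) ∧ k = (nei, p.1.2 ||| (1 <<< pvAt ntb n nei 0)))
    ?_ (pvAt g n p.1.1 []) d k hk
  · rcases this with h | ⟨nei, _, hb, hkey⟩
    · exact Or.inl h
    · subst hkey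
      exact Or.inr ⟨pvAt ntb n nei 0, rfl, hb, rfl⟩
  · intro d' nei k' hk'
    dsimp only at hk'
    split at hk'
    · exact Or.inl hk'
    · rcases (PySem.Dict.mem_keys_insert _ _ _ _).mp hk' with h | h
      · exact Or.inr ⟨by assumption, h⟩
      · exact Or.inl h

-- countP over a nodup list gains exactly one when an unsatisfied member is or-ed in
theorem pvCountP_or (tb : Nat) (p : Nat → Bool) :
    ∀ (l : List Nat), l.Nodup → tb ∈ l → p tb = false →
      l.countP (fun i => p i || i == tb) = l.countP p + 1 := by
  intro l
  induction l with
  | nil => intro _ h; simp at h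
  | cons x t ih =>
    intro hnd hmem hp
    rcases List.nodup_cons.mp hnd with ⟨hxn, hnd'⟩
    by_cases hx : x = tb
    · subst hx
      have htid : t.countP (fun i => p i || i == x) = t.countP p := by
        apply List.countP_congr
        intro y hy
        have : (y == x) = false := by
          simp only [beq_eq_false_iff_ne]
          intro he; exact hxn (he ▸ hy)
        simp [this]
      simp [List.countP_cons, hp, htid]
    · have hmem' : tb ∈ t := by
        rcases List.mem_cons.mp hmem with h | h
        · exact absurd h.symm hx
        · exact h
      have hxx : (x == tb) = false := by simpa using hx
      simp [List.countP_cons, hxx, ih hnd' hmem' hp]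
      omega

theorem pvPc_or (T mask tb : Nat) (hT : tb < T) (hbit : mask.testBit tb = false) :
    pvPc T (mask ||| (1 <<< tb)) = pvPc T mask + 1 := by
  unfold pvPc
  rw [Nat.one_shiftLeft]
  have hfun : (fun i => (mask ||| 2 ^ tb).testBit i) = (fun i => mask.testBit i || i == tb) := by
    funext i
    simp [Nat.testBit_two_pow, eq_comm, ← Bool.beq_eq_decide_eq, Bool.beq_comm]
  rw [hfun]
  exact pvCountP_or tb _ (List.range T) (List.nodup_range) (List.mem_range.mpr hT) hbit

theorem pvPc_shift (T tb : Nat) (hT : tb < T) : pvPc T (1 <<< tb) = 1 := by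
  unfold pvPc
  rw [Nat.one_shiftLeft]
  have hfun : (fun i => (2 ^ tb).testBit i) = (fun i => (fun _ => false) i || i == tb) := by
    funext i
    simp [Nat.testBit_two_pow, eq_comm, ← Bool.beq_eq_decide_eq, Bool.beq_comm]
  rw [hfun]
  rw [pvCountP_or tb _ (List.range T) (List.nodup_range) (List.mem_range.mpr hT) rfl]
  simp

theorem pvSub_bit (T mask i : Nat) (hm : mask &&& (2 ^ T - 1) = mask) (h : T ≤ i) :
    mask.testBit i = false := by
  have hmi := congrArg (fun x => x.testBit i) hm
  simp at hmi
  rcases hb : mask.testBit i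
  · rfl
  · have := hmi hb; omega

theorem pvSubset_or (T mask tb : Nat) (hm : mask &&& (2 ^ T - 1) = mask) (hT : tb < T) :
    (mask ||| (1 <<< tb)) &&& (2 ^ T - 1) = mask ||| (1 <<< tb) := by
  rw [Nat.one_shiftLeft]
  apply Nat.eq_of_testBit_eq
  intro i
  simp
  rcases Nat.lt_or_ge i T with h | h
  · simp [h]
  · have h1 : ¬ i < T := by omega
    have h2 : mask.testBit i = false := pvSub_bit T mask i hm h
    have h3 : tb ≠ i := by omega
    simp [h1, h2, h3]

theorem pvShift_subset (T tb : Nat) (hT : tb < T) : (1 <<< tb) &&& (2 ^ T - 1) = 1 <<< tb := by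
  have := pvSubset_or T 0 tb (by simp) hT
  simpa using this

theorem pvPc_full (T : Nat) : pvPc T (2 ^ T - 1) = T := by
  unfold pvPc
  rw [List.countP_eq_length.mpr]
  · exact List.length_range
  · intro i hi
    simp [Nat.testBit_two_pow_sub_one, List.mem_range.mp hi]

theorem pvOk_full (T mask : Nat) (h : pvOk T T mask) : mask = 2 ^ T - 1 := by
  rcases h with ⟨hsub, hpc⟩
  apply Nat.eq_of_testBit_eq
  intro i
  rcases Nat.lt_or_ge i T with h | h
  · have : ∀ j ∈ List.range T, mask.testBit j = true := by
      apply List.countP_eq_length.mp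
      rw [← pvPc, hpc, List.length_range]
    simp [Nat.testBit_two_pow_sub_one, h, this i (List.mem_range.mpr h)]
  · have h1 : ¬ i < T := by omega
    simp [Nat.testBit_two_pow_sub_one, h1, pvSub_bit T mask i hsub h]

theorem pvFoldl_ite_add {β : Type} (cond : β → Prop) [DecidablePred cond] (v : β → Int) :
    ∀ (l : List β) (a : Int),
      l.foldl (fun acc x => if cond x then acc else acc + v x) a
        = a + (l.map (fun x => if cond x then (0 : Int) else v x)).sum := by
  intro l
  induction l with
  | nil => intro a; simp
  | cons x t ih =>
    intro a
    simp only [List.foldl_cons, List.map_cons, List.sum_cons, ih]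
    split <;> ring

theorem pvSum_empty (f : Int × Nat → Int) : pvSum PySem.Dict.empty f = 0 := rfl

theorem pvNodup_empty : (PySem.Dict.empty (κ := Int × Nat) (ν := Int)).keys.Nodup := by
  rw [PySem.Dict.keys_empty]; exact List.nodup_nil

theorem pvE_eq (g : List (List Int)) (ntb : List Nat) (n T : Nat)
    (hT : 0 < T) (hntb : ∀ x ∈ ntb, x < T) (p : (Int × Nat) × Int)
    (hmask : p.1.2 ≠ 2 ^ T - 1) :
    pvE g ntb n (pvD g ntb n (2 ^ T - 1)) p = p.2 * pvD g ntb n (2 ^ T - 1) p.1 := by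
  conv_rhs => rw [pvD, pvDfs]
  rw [if_neg hmask]
  show pvE g ntb n (pvD g ntb n (2 ^ T - 1)) p
      = p.2 * (pvAt g n p.1.1 []).foldl (fun acc nei =>
          if (p.1.2 >>> pvAt ntb n nei 0) &&& 1 = 1 then acc
          else acc + pvDfs g ntb n (2 ^ T - 1) (2 ^ T - 1) nei (p.1.2 ||| (1 <<< pvAt ntb n nei 0))) 0
  rw [pvFoldl_ite_add, zero_add, pvE, ← List.sum_map_mul_left]
  apply congrArg
  apply List.map_congr_left
  intro nei _
  dsimp only
  by_cases hb : (p.1.2 >>> pvAt ntb n nei 0) &&& 1 = 1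
  · simp [hb]
  · rw [if_neg hb, if_neg hb]
    congr 1
    have htb : pvAt ntb n nei 0 < T := pvTb_lt ntb n T hT hntb nei
    have hbit : p.1.2.testBit (pvAt ntb n nei 0) = false := by
      rcases h : p.1.2.testBit (pvAt ntb n nei 0)
      · rfl
      · exact absurd ((pvBit _ _).mpr h) hb
    have hg := pvMaskGrow T p.1.2 (pvAt ntb n nei 0) htb hbit
    have hfull : 1 ≤ 2 ^ T - 1 := by
      have := Nat.one_lt_two_pow_iff.mpr (by omega : T ≠ 0)
      omega
    rw [Nat.one_shiftLeft, pvD]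
    have h1 := hg.1
    have h2 := hg.2
    exact (pvDfs_fuel g ntb n T hT hntb (2 ^ T - 1) (2 ^ T - 1 + 1) nei
      (p.1.2 ||| 2 ^ pvAt ntb n nei 0) (by omega) (by omega)).symm

theorem pvStep_nodup (g : List (List Int)) (ntb : List Nat) (n : Nat)
    (fr : PySem.Dict (Int × Nat) Int) : (pvStep g ntb n fr).keys.Nodup := by
  unfold pvStep
  exact pvFoldl_pres _ (fun (d : PySem.Dict (Int × Nat) Int) => d.keys.Nodup)
    (fun d p hd => pvStepEntry_nodup g ntb n d p hd) fr.items PySem.Dict.empty pvNodup_empty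

theorem pvStep_keys (g : List (List Int)) (ntb : List Nat) (n T j : Nat)
    (hT : 0 < T) (hntb : ∀ x ∈ ntb, x < T)
    (fr : PySem.Dict (Int × Nat) Int) (hok : ∀ k ∈ fr.keys, pvOk T j k.2) :
    ∀ k ∈ (pvStep g ntb n fr).keys, pvOk T (j + 1) k.2 := by
  intro k hk
  unfold pvStep at hk
  have := pvFoldl_keys (pvStepEntry g ntb n)
    (fun p k => ∃ tb, tb = pvAt ntb n k.1 0 ∧ ¬((p.1.2 >>> tb) &&& 1 = 1) ∧ k.2 = p.1.2 ||| (1 <<< tb))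
    (fun d p k hk => pvStepEntry_keys g ntb n d p k hk) fr.items PySem.Dict.empty k hk
  rcases this with h | ⟨p, hp, tb, htb, hb, hk2⟩
  · rw [PySem.Dict.keys_empty] at h; simp at h
  · have hpk : p.1 ∈ fr.keys := PySem.Dict.mem_keys_of_mem_items fr hp
    rcases hok p.1 hpk with ⟨hsub, hpc⟩
    have htbT : tb < T := htb ▸ pvTb_lt ntb n T hT hntb k.1
    have hbit : p.1.2.testBit tb = false := by
      rcases h : p.1.2.testBit tb
      · rfl
      · exact absurd ((pvBit _ _).mpr h) hb
    rw [hk2]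
    exact ⟨pvSubset_or T p.1.2 tb hsub htbT, by rw [pvPc_or T p.1.2 tb htbT hbit, hpc]⟩

theorem pvStep_sum (g : List (List Int)) (ntb : List Nat) (n T : Nat)
    (hT : 0 < T) (hntb : ∀ x ∈ ntb, x < T)
    (fr : PySem.Dict (Int × Nat) Int)
    (hkeys : ∀ k ∈ fr.keys, k.2 ≠ 2 ^ T - 1) :
    pvSum (pvStep g ntb n fr) (pvD g ntb n (2 ^ T - 1)) = pvSum fr (pvD g ntb n (2 ^ T - 1)) := by
  unfold pvStep
  rw [pvOuter_sum g ntb n _ fr.items PySem.Dict.empty pvNodup_empty, pvSum_empty, zero_add]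
  unfold pvSum
  apply congrArg
  apply List.map_congr_left
  intro p hp
  exact pvE_eq g ntb n T hT hntb p (hkeys p.1 (PySem.Dict.mem_keys_of_mem_items fr hp))

theorem pvFinal (g : List (List Int)) (ntb : List Nat) (n T : Nat)
    (fr : PySem.Dict (Int × Nat) Int)
    (hok : ∀ k ∈ fr.keys, pvOk T T k.2) :
    fr.values.foldl (· + ·) 0 = pvSum fr (pvD g ntb n (2 ^ T - 1)) := by
  have hv : fr.values = fr.items.map (·.2) := rfl
  rw [hv, PySem.List.foldl_add _ (fun x => x) 0, zero_add]
  have hmap : ∀ p ∈ fr.items, p.2 = p.2 * pvD g ntb n (2 ^ T - 1) p.1 := by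
    intro p hp
    have h2 := pvOk_full T p.1.2 (hok p.1 (PySem.Dict.mem_keys_of_mem_items fr hp))
    rw [pvD, h2, pvDfs, if_pos rfl]
    ring
  rw [List.map_id', pvSum, List.map_congr_left hmap]

theorem pvOk_ne_full (T j mask : Nat) (hj : j < T) (h : pvOk T j mask) : mask ≠ 2 ^ T - 1 := by
  intro he
  rcases h with ⟨_, hpc⟩
  rw [he, pvPc_full] at hpc
  omega

theorem pvLoop (g : List (List Int)) (ntb : List Nat) (n T : Nat)
    (hT : 0 < T) (hntb : ∀ x ∈ ntb, x < T) :
    ∀ (l : List Int) (j : Nat) (fr : PySem.Dict (Int × Nat) Int),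
      fr.keys.Nodup → (∀ k ∈ fr.keys, pvOk T (j + 1) k.2) → j + 1 + l.length = T →
      (l.foldl (fun fr _ => pvStep g ntb n fr) fr).values.foldl (· + ·) 0
        = pvSum fr (pvD g ntb n (2 ^ T - 1)) := by
  intro l
  induction l with
  | nil =>
    intro j fr hnd hok hlen
    simp only [List.foldl_nil]
    apply pvFinal
    simp at hlen
    exact hlen ▸ hok
  | cons x t ih =>
    intro j fr hnd hok hlen
    simp only [List.foldl_cons]
    have hjT : j + 1 < T := by simp at hlen; omega
    rw [ih (j + 1) (pvStep g ntb n fr) (pvStep_nodup g ntb n fr)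
      (pvStep_keys g ntb n T (j + 1) hT hntb fr hok) (by simp at hlen ⊢; omega)]
    exact pvStep_sum g ntb n T hT hntb fr
      (fun k hk => pvOk_ne_full T (j + 1) k.2 hjT (hok k hk))

theorem pvInit_sum (ntb : List Nat) (n : Nat) (f : Int × Nat → Int) :
    ∀ (us : List Int) (d : PySem.Dict (Int × Nat) Int), d.keys.Nodup →
      pvSum (us.foldl (fun d u =>
        d.insert (pvFrontKey ntb n u) (d.getD (pvFrontKey ntb n u) 0 + 1)) d) f
      = pvSum d f + (us.map (fun u => f (pvFrontKey ntb n u))).sum := by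
  intro us
  induction us with
  | nil => intro d hnd; simp
  | cons u t ih =>
    intro d hnd
    simp only [List.foldl_cons, List.map_cons, List.sum_cons]
    rw [ih _ (PySem.Dict.nodup_keys_insert _ _ _ hnd), pvSum_insert d f _ 1 hnd]
    ring

theorem pvInit_nodup (ntb : List Nat) (n : Nat) (us : List Int) :
    ((us.foldl (fun d u =>
      d.insert (pvFrontKey ntb n u) (d.getD (pvFrontKey ntb n u) 0 + 1)) (PySem.Dict.empty : PySem.Dict (Int × Nat) Int))).keys.Nodup := by
  exact pvFoldl_pres _ (fun (d : PySem.Dict (Int × Nat) Int) => d.keys.Nodup)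
    (fun d u hd => PySem.Dict.nodup_keys_insert _ _ _ hd) us PySem.Dict.empty pvNodup_empty

theorem pvInit_keys (ntb : List Nat) (n T : Nat) (hT : 0 < T) (hntb : ∀ x ∈ ntb, x < T)
    (us : List Int) :
    ∀ k ∈ ((us.foldl (fun d u =>
      d.insert (pvFrontKey ntb n u) (d.getD (pvFrontKey ntb n u) 0 + 1)) (PySem.Dict.empty : PySem.Dict (Int × Nat) Int))).keys,
      pvOk T 1 k.2 := by
  intro k hk
  have := pvFoldl_keys (fun d u =>
      d.insert (pvFrontKey ntb n u) (d.getD (pvFrontKey ntb n u) 0 + 1))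
    (fun u k => k = pvFrontKey ntb n u)
    (fun d u k hk => by
      rcases (PySem.Dict.mem_keys_insert _ _ _ _).mp hk with h | h
      · exact Or.inr h
      · exact Or.inl h) us PySem.Dict.empty k hk
  rcases this with h | ⟨u, _, hku⟩
  · rw [PySem.Dict.keys_empty] at h; simp at h
  · subst hku
    have htb : pvAt ntb n u 0 < T := pvTb_lt ntb n T hT hntb u
    exact ⟨pvShift_subset T _ htb, pvPc_shift T _ htb⟩

theorem pvNtb_lt (st : List String) :
    ∀ x ∈ pvNodeTbit st, x < (PySem.List.dedup st).length := by
  intro x hx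
  rcases List.mem_map.mp hx with ⟨tp, htp, hval⟩
  have hmem : tp ∈ PySem.List.dedup st := (PySem.List.mem_dedup st tp).mpr htp
  rcases Option.isSome_iff_exists.mp ((PySem.List.index?_isSome_iff _ _).mpr hmem) with ⟨k, hk⟩
  rcases PySem.List.getElem_of_index?_eq_some hk with ⟨hklt, _, _⟩
  rw [← hval, hk]
  exact hklt

theorem pvT_pos (st : List String) (hn : st.length ≠ 0) : 0 < (PySem.List.dedup st).length := by
  rcases st with _ | ⟨s, t⟩
  · simp at hn
  · have : s ∈ PySem.List.dedup (s :: t) := (PySem.List.mem_dedup _ _).mpr (List.mem_cons_self ..)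
    exact List.length_pos_of_mem this

theorem pvAB (st : List String) (roads : List (Int × Int)) :
    count_valid_paths_topdown st roads = count_valid_paths_topdown_alt st roads := by
  simp only [count_valid_paths_topdown, count_valid_paths_topdown_alt]
  by_cases hn : st.length = 0
  · rw [if_pos hn, if_pos hn]
  · rw [if_neg hn, if_neg hn]
    have hT : 0 < (PySem.List.dedup st).length := pvT_pos st hn
    have hntb := pvNtb_lt st
    set T := (PySem.List.dedup st).length with hTdef
    set g := pvGraph st.length roads
    set ntb := pvNodeTbit st
    set n := st.length
    rw [pvLoop g ntb n T hT hntb (PySem.List.pyRange 0 ((T : Int) - 1) 1) 0 _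
      (pvInit_nodup ntb n _) (pvInit_keys ntb n T hT hntb _)
      (by rw [PySem.List.length_pyRange_one]; omega)]
    rw [pvInit_sum ntb n _ _ _ pvNodup_empty, pvSum_empty, zero_add]
    rw [PySem.List.foldl_add, zero_add]
    apply congrArg
    apply List.map_congr_left
    intro u _
    rfl

-- ===== VERDICT (by name: the statement is the Claim_ definition above) =====
theorem count_valid_paths_topdown_spec : Claim_equal_count_valid_paths_topdown := by
  intro st roads _ _
  unfold Spec_count_valid_paths_topdown
  exact pvAB st roads
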